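-- pv_equiv track=rewrite | github.com/alena-zayts/BMSTU_5sem_analysis_of_algorithms | lab6/src/time_cmp.py | generate_matrix_all_same
-- ===== SOURCE A (Python) =====
-- def generate_matrix_all_same(n):
--     D = [[0 for i in range(n)] for j in range(n)]
--     for i in range(n):
--         for j in range(i):
--             if i != j:
--                 D[i][j] = 3
--                 D[j][i] = 3
--     return D
-- ===== SOURCE B (Python) =====
-- def generate_matrix_all_same(n):
--     D = [[3] * n for _ in range(n)]
--     for i in range(n):
--         D[i][i] = 0
--     return D
-- ===== Notes on version B (the rewrite author's own statement) =====
-- stated objective: simpler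
-- what changed: B allocates every row pre-filled with the off-diagonal constant and then zeroes the diagonal in one pass, instead of A's zero matrix followed by a triangular double loop doing symmetric double-assignment.
import Mathlib
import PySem

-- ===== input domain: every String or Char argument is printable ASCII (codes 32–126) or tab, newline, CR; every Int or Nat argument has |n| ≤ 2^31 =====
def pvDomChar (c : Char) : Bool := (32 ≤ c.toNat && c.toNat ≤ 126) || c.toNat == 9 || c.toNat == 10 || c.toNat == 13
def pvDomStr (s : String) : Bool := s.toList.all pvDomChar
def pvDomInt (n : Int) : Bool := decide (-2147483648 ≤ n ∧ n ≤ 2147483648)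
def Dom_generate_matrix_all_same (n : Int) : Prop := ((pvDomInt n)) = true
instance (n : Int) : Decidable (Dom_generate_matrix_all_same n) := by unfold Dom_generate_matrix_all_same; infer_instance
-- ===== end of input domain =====

-- B allocates rows pre-filled with the off-diagonal constant and zeroes the diagonal in one pass,
-- instead of A's zero matrix plus triangular symmetric double-assignment pass; objective: simpler.

-- ===== PORT A =====
def generate_matrix_all_same (n : Int) : List (List Int) :=
  let D := (PySem.List.pyRange 0 n 1).map (fun _j => (PySem.List.pyRange 0 n 1).map (fun _i => (0 : Int)))
  (PySem.List.pyRange 0 n 1).foldl (fun D i =>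
    (PySem.List.pyRange 0 i 1).foldl (fun D j =>
      if i ≠ j then
        let D := PySem.List.pySetD D i (PySem.List.pySetD (PySem.List.pyGetD D i []) j 3)
        PySem.List.pySetD D j (PySem.List.pySetD (PySem.List.pyGetD D j []) i 3)
      else D) D) D

-- ===== PORT B =====
-- '[3] * n' builds max(n, 0) copies of 3, which is exactly List.replicate n.toNat 3.
def generate_matrix_all_same_alt (n : Int) : List (List Int) :=
  let D := (PySem.List.pyRange 0 n 1).map (fun _ => List.replicate n.toNat (3 : Int))
  (PySem.List.pyRange 0 n 1).foldl (fun D i =>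
    PySem.List.pySetD D i (PySem.List.pySetD (PySem.List.pyGetD D i []) i 0)) D

-- ===== PRECONDITION & SPEC =====
def Spec_generate_matrix_all_same (n : Int) (out : List (List Int)) : Prop := out = generate_matrix_all_same_alt n
instance (n : Int) (out : List (List Int)) : Decidable (Spec_generate_matrix_all_same n out) := by unfold Spec_generate_matrix_all_same; infer_instance

-- ===== CLAIM (what is proved, stated in full; the proofs are below) =====
def Claim_equal_generate_matrix_all_same : Prop := ∀ (n : Int), Dom_generate_matrix_all_same n → Spec_generate_matrix_all_same n (generate_matrix_all_same n)

-- ===== LEMMAS AND PROOFS =====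

-- the Nat-level loop bodies the two ports reduce to
def pvStepA (D : List (List Int)) (p : Nat × Nat) : List (List Int) :=
  let D1 := D.set p.1 ((D.getD p.1 []).set p.2 3)
  D1.set p.2 ((D1.getD p.2 []).set p.1 3)

def pvStepB (D : List (List Int)) (i : Nat) : List (List Int) :=
  D.set i ((D.getD i []).set i 0)

-- the entry at row r, column c (none when out of range)
def pvE (D : List (List Int)) (r c : Nat) : Option Int := (D[r]?).bind (fun row => row[c]?)

-- the list of index pairs A's triangular double loop visits
def pvPairs (m : Nat) : List (Nat × Nat) :=
  (List.range m).flatMap (fun i => (List.range i).map (fun j => (i, j)))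

lemma pvMem_pairs (m a b : Nat) : (a, b) ∈ pvPairs m ↔ a < m ∧ b < a := by
  simp [pvPairs]

lemma pvRange_nat (n : Int) : PySem.List.pyRange 0 n 1 = (List.range n.toNat).map (fun k : Nat => (k : Int)) := by
  rw [PySem.List.pyRange_one, List.map_eq_flatMap]
  norm_num
  exact List.map_eq_flatMap.symm

lemma pvRange_natcast (i : Nat) : PySem.List.pyRange 0 (i : Int) 1 = (List.range i).map (fun k : Nat => (k : Int)) := by
  rw [pvRange_nat]
  norm_num

lemma pvRowSet (D : List (List Int)) (i j : Nat) (v : Int) (r : Nat) :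
    (D.set i ((D.getD i []).set j v))[r]? = if r = i then (D[r]?).map (fun row => row.set j v) else D[r]? := by
  rw [List.getElem?_set]
  by_cases h : r = i
  · subst h
    by_cases hr : r < D.length
    · simp [hr, List.getD_eq_getElem?_getD]
    · simp [hr, List.getElem?_eq_none (le_of_not_gt hr)]
  · simp [h, Ne.symm h]

lemma pvRow_stepA (D : List (List Int)) (i j r : Nat) (hij : i ≠ j) :
    (pvStepA D (i, j))[r]? =
      if r = i then (D[r]?).map (fun row => row.set j 3)
      else if r = j then (D[r]?).map (fun row => row.set i 3)
      else D[r]? := by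
  unfold pvStepA
  rw [pvRowSet]
  by_cases hj : r = j
  · subst hj
    rw [pvRowSet]
    simp [Ne.symm hij]
  · simp only [hj, if_false]
    rw [pvRowSet]

lemma pvE_stepA (D : List (List Int)) (i j r c : Nat) (hij : i ≠ j) :
    pvE (pvStepA D (i, j)) r c =
      if (r = i ∧ c = j) ∨ (r = j ∧ c = i) then (pvE D r c).map (fun _ => 3) else pvE D r c := by
  unfold pvE
  rw [pvRow_stepA D i j r hij]
  by_cases hi : r = i
  · simp only [if_pos hi]
    subst hi
    cases hD : D[r]? with
    | none => simp [hij]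
    | some row =>
      simp only [Option.map_some, Option.bind_some]
      rw [List.getElem?_set]
      by_cases hc : c = j
      · subst hc
        by_cases hlt : c < row.length
        · simp [hlt]
        · simp [hlt, List.getElem?_eq_none (le_of_not_gt hlt), hij]
      · simp [hc, Ne.symm hc, fun h : r = j => hij h]
  · by_cases hj : r = j
    · simp only [if_neg hi, if_pos hj]
      subst hj
      cases hD : D[r]? with
      | none => simp [hi]
      | some row =>
        simp only [Option.map_some, Option.bind_some]
        rw [List.getElem?_set]
        by_cases hc : c = i
        · subst hc
          by_cases hlt : c < row.length
          · simp [hlt]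
          · simp [hlt, List.getElem?_eq_none (le_of_not_gt hlt)]
        · simp [hc, Ne.symm hc, hi]
    · simp [hi, hj]

lemma pvE_foldA (P : List (Nat × Nat)) (hP : ∀ p ∈ P, p.1 ≠ p.2) (D : List (List Int)) (r c : Nat) :
    pvE (P.foldl pvStepA D) r c =
      if (r, c) ∈ P ∨ (c, r) ∈ P then (pvE D r c).map (fun _ => 3) else pvE D r c := by
  induction P generalizing D with
  | nil => simp
  | cons p P ih =>
    obtain ⟨i, j⟩ := p
    have hij : i ≠ j := hP (i, j) (by simp)
    rw [List.foldl_cons, ih (fun q hq => hP q (by simp [hq])), pvE_stepA D i j r c hij]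
    have hC : ((r, c) ∈ (i, j) :: P ∨ (c, r) ∈ (i, j) :: P) ↔
        (((r = i ∧ c = j) ∨ (r = j ∧ c = i)) ∨ ((r, c) ∈ P ∨ (c, r) ∈ P)) := by
      simp only [List.mem_cons, Prod.ext_iff]
      tauto
    by_cases h2 : (r = i ∧ c = j) ∨ (r = j ∧ c = i) <;>
      by_cases h1 : (r, c) ∈ P ∨ (c, r) ∈ P <;>
      simp only [hC, h1, h2, if_true, if_false, true_or, or_true, false_or, or_false,
        iff_true, if_pos, if_neg, not_false_iff] <;>
      (try (cases pvE D r c <;> rfl))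

lemma pvLenA (P : List (Nat × Nat)) (D : List (List Int)) :
    (P.foldl pvStepA D).length = D.length := by
  induction P generalizing D with
  | nil => rfl
  | cons p P ih => simp [List.foldl_cons, ih, pvStepA]

lemma pvRow_foldB (l : List Nat) (hl : l.Nodup) (D : List (List Int)) (r : Nat) :
    (l.foldl pvStepB D)[r]? = if r ∈ l then (D[r]?).map (fun row => row.set r 0) else D[r]? := by
  induction l generalizing D with
  | nil => simp
  | cons i l ih =>
    rw [List.foldl_cons, ih (List.Nodup.of_cons hl)]
    have hrow : (pvStepB D i)[r]? = if r = i then (D[r]?).map (fun row => row.set i 0) else D[r]? :=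
      pvRowSet D i i 0 r
    by_cases hmem : r ∈ l
    · have hne : r ≠ i := fun h => (List.nodup_cons.mp hl).1 (h ▸ hmem)
      simp [hmem, hrow, hne]
    · by_cases hri : r = i
      · subst hri
        simp [hmem, hrow]
      · simp [hmem, hrow, hri]

lemma pvFoldFlat {α β σ : Type} (l : List α) (g : α → List β) (f : σ → β → σ) (s : σ) :
    l.foldl (fun s a => (g a).foldl f s) s = (l.flatMap g).foldl f s := by
  induction l generalizing s with
  | nil => rfl
  | cons a l ih => simp [List.flatMap_cons, List.foldl_append, ih]

lemma pvB_eq (n : Int) :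
    generate_matrix_all_same_alt n =
      (List.range n.toNat).foldl pvStepB (List.replicate n.toNat (List.replicate n.toNat 3)) := by
  unfold generate_matrix_all_same_alt
  rw [pvRange_nat, List.foldl_map (f := fun k : Nat => (k : Int))]
  simp only [PySem.List.pySetD_natCast, PySem.List.pyGetD_natCast, List.map_const',
    List.length_map, List.length_range]
  rfl

lemma pvA_eq (n : Int) :
    generate_matrix_all_same n =
      (pvPairs n.toNat).foldl pvStepA
        (List.replicate n.toNat (List.replicate n.toNat 0)) := by
  unfold generate_matrix_all_same pvPairs
  rw [pvRange_nat, List.foldl_map (f := fun k : Nat => (k : Int)), ← pvFoldFlat]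
  have hinit : List.map (fun _j => List.map (fun _i => (0 : Int)) (List.map (fun k : Nat => (k : Int)) (List.range n.toNat))) (List.map (fun k : Nat => (k : Int)) (List.range n.toNat)) = List.replicate n.toNat (List.replicate n.toNat 0) := by
    simp [Function.comp_def, List.map_const']
  rw [hinit]
  apply PySem.List.foldl_congr_mem
  intro D i _hi
  rw [pvRange_natcast, List.foldl_map (f := fun k : Nat => (k : Int)), List.foldl_map (f := fun j => (i, j))]
  apply PySem.List.foldl_congr_mem
  intro D' j hj
  have hij : i ≠ j := by
    have := List.mem_range.mp hj
    omega
  simp [pvStepA, hij]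

lemma pvFinal (n : Int) : generate_matrix_all_same n = generate_matrix_all_same_alt n := by
  rw [pvA_eq, pvB_eq]
  have hP : ∀ p ∈ pvPairs n.toNat, p.1 ≠ p.2 := by
    intro p hp
    have := (pvMem_pairs n.toNat p.1 p.2).mp hp
    omega
  apply List.ext_getElem?
  intro r
  rw [pvRow_foldB _ List.nodup_range _ r]
  by_cases hr : r < n.toNat
  · rw [if_pos (List.mem_range.mpr hr), List.getElem?_replicate, if_pos hr]
    have hlen : ((pvPairs n.toNat).foldl pvStepA (List.replicate n.toNat (List.replicate n.toNat 0))).length = n.toNat := by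
      rw [pvLenA, List.length_replicate]
    have hsome : r < ((pvPairs n.toNat).foldl pvStepA (List.replicate n.toNat (List.replicate n.toNat 0))).length := by omega
    obtain ⟨rowA, hA⟩ : ∃ row, ((pvPairs n.toNat).foldl pvStepA (List.replicate n.toNat (List.replicate n.toNat 0)))[r]? = some row :=
      ⟨_, List.getElem?_eq_getElem hsome⟩
    simp only [Option.map_some]
    rw [hA]
    refine congrArg some (List.ext_getElem? fun c => ?_)
    have hEc : rowA[c]? = pvE ((pvPairs n.toNat).foldl pvStepA (List.replicate n.toNat (List.replicate n.toNat 0))) r c := by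
      simp [pvE, hA]
    rw [hEc, pvE_foldA _ hP]
    have hZ : pvE (List.replicate n.toNat (List.replicate n.toNat 0)) r c = if c < n.toNat then some 0 else none := by
      simp [pvE, List.getElem?_replicate, hr]
    rw [hZ, List.getElem?_set, List.getElem?_replicate]
    simp only [pvMem_pairs, List.length_replicate]
    split_ifs <;> simp_all
  · rw [if_neg (by simpa using hr), List.getElem?_replicate, if_neg hr,
      List.getElem?_eq_none (by rw [pvLenA, List.length_replicate]; omega)]

-- ===== VERDICT (by name: the statement is the Claim_ definition above) =====
theorem generate_matrix_all_same_spec : Claim_equal_generate_matrix_all_same := by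
  intro n _
  unfold Spec_generate_matrix_all_same
  exact pvFinal n
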